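-- pv_equiv track=rewrite | github.com/westorin/skvis | main/logic/tournamentmanager.py | sort_into_rows_of_tens
-- ===== SOURCE A (Python) =====
-- from typing import List, Dict, Tuple, Optional, Any, TYPE_CHECKING
--
-- def sort_into_rows_of_tens(rows: List[List[str]], columns: int) -> List[List[List[str]]]:
--     """Split rows into pages of 10 rows each. Pads the last page with placeholder rows"""
--     remaining_rows = list(rows)
--     pages: List[List[List[str]]] = []
--
--     if len(remaining_rows) % 10 == 0:
--         page_count = len(remaining_rows) // 10
--     else:
--         page_count = (len(remaining_rows) // 10) + 1
--
--     for _ in range(page_count):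
--         current_page: List[List[str]] = []
--
--         if (len(remaining_rows) // 10) > 0:
--             # Full page
--             for _ in range(10):
--                 current_page.append(remaining_rows[0])
--                 remaining_rows = remaining_rows[1:]
--             pages.append(current_page)
--
--         elif (len(remaining_rows) // 10) == 0 and len(remaining_rows) % 10 != 0:
--             # Partial page
--             for row in remaining_rows:
--                 current_page.append(row)
--             remaining_rows = []
--
--             # Pad with empty rows
--             missing = 10 - len(current_page)
--             for _ in range(missing):
--                 current_page.append([""] * columns)
--
--             pages.append(current_page)
--
--     return pages
-- ===== SOURCE B (Python) =====
-- def sort_into_rows_of_tens(rows, columns):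
--     """Split rows into pages of 10 rows each. Pads the last page with placeholder rows"""
--     pad = (-len(rows)) % 10
--     padded = list(rows) + [[""] * columns for _ in range(pad)]
--     return [padded[i:i + 10] for i in range(0, len(padded), 10)]
-- ===== Notes on version B (the rewrite author's own statement) =====
-- stated objective: simpler
-- what changed: B pads the whole list up to a multiple of 10 once via (-n)%10 and then does one uniform slice-chunking pass, removing A's per-page full-vs-partial branching and its repeated list re-slicing state.
import Mathlib
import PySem

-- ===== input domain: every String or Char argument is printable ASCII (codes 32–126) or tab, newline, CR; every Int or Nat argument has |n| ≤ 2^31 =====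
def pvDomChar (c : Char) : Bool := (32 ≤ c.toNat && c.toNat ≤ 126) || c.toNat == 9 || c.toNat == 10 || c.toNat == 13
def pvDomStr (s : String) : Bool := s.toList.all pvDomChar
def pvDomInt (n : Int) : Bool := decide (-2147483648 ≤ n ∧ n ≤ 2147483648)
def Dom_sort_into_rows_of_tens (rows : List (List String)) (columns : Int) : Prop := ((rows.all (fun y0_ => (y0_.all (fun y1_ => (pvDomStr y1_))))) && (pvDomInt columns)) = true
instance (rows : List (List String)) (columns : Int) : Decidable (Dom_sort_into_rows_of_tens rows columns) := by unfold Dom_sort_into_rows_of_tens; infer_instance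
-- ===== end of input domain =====

-- B pads the whole list up to a multiple of 10 once and then chunks it in one uniform
-- slice pass, removing A's per-page full-vs-partial branch (objective: simpler).

-- ===== PORT A =====
-- inner 'for _ in range(10)' loop of the full-page branch:
-- state = (current_page, remaining_rows); remaining_rows[0] is in range because the
-- branch guard ensures len(remaining_rows) ≥ 10, so headD is exact here; remaining[1:] = drop 1.
def pvAInner (remaining : List (List String)) : List (List String) × List (List String) :=
  (List.range 10).foldl (fun p _ => (p.1 ++ [p.2.headD []], p.2.drop 1)) ([], remaining)

-- one iteration of A's 'for _ in range(page_count)' loop; state = (remaining_rows, pages)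
-- (lengths are Nat, so Python's // and % on the nonnegative len agree with Nat / and %)
def pvAStep (columns : Int) (remaining : List (List String))
    (pages : List (List (List String))) :
    List (List String) × List (List (List String)) :=
  if remaining.length / 10 > 0 then
    -- Full page
    let (current_page, remaining') := pvAInner remaining
    (remaining', pages ++ [current_page])
  else if remaining.length / 10 == 0 && remaining.length % 10 != 0 then
    -- Partial page
    let current_page := remaining.foldl (fun cp row => cp ++ [row]) []
    -- Pad with empty rows ([""] * columns repeats max(0, columns) times = toNat)
    let missing := 10 - current_page.length
    let current_page :=
      (List.range missing).foldl (fun cp _ => cp ++ [List.replicate columns.toNat ""]) current_page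
    ([], pages ++ [current_page])
  else
    (remaining, pages)

-- 'for _ in range(page_count)': apply pvAStep page_count times
def pvALoop (columns : Int) : Nat → List (List String) → List (List (List String)) →
    (List (List String) × List (List (List String)))
  | 0, remaining, pages => (remaining, pages)
  | k + 1, remaining, pages =>
      let st := pvAStep columns remaining pages
      pvALoop columns k st.1 st.2

def sort_into_rows_of_tens (rows : List (List String)) (columns : Int) : List (List (List String)) :=
  let page_count := if rows.length % 10 == 0 then rows.length / 10 else rows.length / 10 + 1
  (pvALoop columns page_count rows []).2

-- ===== PORT B =====
def sort_into_rows_of_tens_alt (rows : List (List String)) (columns : Int) : List (List (List String)) :=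
  -- pad = (-len(rows)) % 10  (Python mod, positive divisor ⇒ nonnegative, so toNat is exact)
  let pad := (PySem.Int.mod (-(rows.length : Int)) 10).toNat
  -- padded = list(rows) + [[""] * columns for _ in range(pad)]
  let padded := rows ++ (List.range pad).map (fun _ => List.replicate columns.toNat "")
  -- [padded[i:i+10] for i in range(0, len(padded), 10)]
  (PySem.List.pyRange 0 (padded.length : Int) 10).map
    (fun i => PySem.List.slice padded (some i) (some (i + 10)))

-- ===== PRECONDITION & SPEC =====
def Spec_sort_into_rows_of_tens (rows : List (List String)) (columns : Int) (out : List (List (List String))) : Prop := out = sort_into_rows_of_tens_alt rows columns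
instance (rows : List (List String)) (columns : Int) (out : List (List (List String))) : Decidable (Spec_sort_into_rows_of_tens rows columns out) := by unfold Spec_sort_into_rows_of_tens; infer_instance

-- ===== CLAIM (what is proved, stated in full; the proofs are below) =====
def Claim_equal_sort_into_rows_of_tens : Prop := ∀ (rows : List (List String)) (columns : Int), Dom_sort_into_rows_of_tens rows columns → Spec_sort_into_rows_of_tens rows columns (sort_into_rows_of_tens rows columns)

-- ===== LEMMAS AND PROOFS =====

-- canonical chunking both ports are reduced to
def pvChunk (columns : Int) (rows : List (List String)) : List (List (List String)) :=
  if rows = [] then []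
  else if 10 ≤ rows.length then rows.take 10 :: pvChunk columns (rows.drop 10)
  else [rows ++ List.replicate (10 - rows.length) (List.replicate columns.toNat "")]
termination_by rows.length
decreasing_by
  rename_i h _
  have : rows.length ≠ 0 := fun hl => h (List.eq_nil_of_length_eq_zero hl)
  simp only [List.length_drop]; omega

lemma pvAInner_eq (l : List (List String)) (h : 10 ≤ l.length) :
    pvAInner l = (l.take 10, l.drop 10) := by
  rcases l with _ | ⟨a0, l⟩; · simp at h
  rcases l with _ | ⟨a1, l⟩; · simp at h
  rcases l with _ | ⟨a2, l⟩; · simp at h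
  rcases l with _ | ⟨a3, l⟩; · simp at h
  rcases l with _ | ⟨a4, l⟩; · simp at h
  rcases l with _ | ⟨a5, l⟩; · simp at h
  rcases l with _ | ⟨a6, l⟩; · simp at h
  rcases l with _ | ⟨a7, l⟩; · simp at h
  rcases l with _ | ⟨a8, l⟩; · simp at h
  rcases l with _ | ⟨a9, l⟩; · simp at h
  rfl

lemma pvFoldPush (l : List (List String)) (acc : List (List String)) :
    l.foldl (fun cp row => cp ++ [row]) acc = acc ++ l := by
  induction l generalizing acc with
  | nil => simp
  | cons x xs ih => simp [List.foldl_cons, ih]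

lemma pvFoldPad (x : List String) (m : Nat) (acc : List (List String)) :
    (List.range m).foldl (fun cp _ => cp ++ [x]) acc = acc ++ List.replicate m x := by
  induction m generalizing acc with
  | zero => simp
  | succ k ih =>
      rw [List.range_succ, List.foldl_append, ih]
      simp [List.replicate_succ']

lemma pvALoop_eq (columns : Int) :
    ∀ n (rows : List (List String)) (pages : List (List (List String))),
    rows.length = n →
    pvALoop columns (if n % 10 == 0 then n / 10 else n / 10 + 1) rows pages
      = ([], pages ++ pvChunk columns rows) := by
  intro n
  induction n using Nat.strong_induction_on with
  | _ n ih =>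
    intro rows pages hlen
    by_cases h10 : 10 ≤ n
    · -- full page first
      have hpc : (if n % 10 == 0 then n / 10 else n / 10 + 1)
          = (if (n - 10) % 10 == 0 then (n - 10) / 10 else (n - 10) / 10 + 1) + 1 := by
        by_cases h : n % 10 = 0
        · have h' : (n - 10) % 10 = 0 := by omega
          simp [h, h']; omega
        · have h' : (n - 10) % 10 ≠ 0 := by omega
          simp [h, h']; omega
      rw [hpc, pvALoop]
      have hstep : pvAStep columns rows pages = (rows.drop 10, pages ++ [rows.take 10]) := by
        unfold pvAStep
        rw [pvAInner_eq rows (by omega)]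
        have : rows.length / 10 > 0 := by rw [hlen]; omega
        simp [this]
      rw [hstep]
      rw [ih (n - 10) (by omega) _ _ (by simp [hlen])]
      have hne : rows ≠ [] := by intro he; rw [he] at hlen; simp at hlen; omega
      have hch : pvChunk columns rows = rows.take 10 :: pvChunk columns (rows.drop 10) := by
        rw [pvChunk]
        simp [hne, show 10 ≤ rows.length by omega]
      rw [hch]; simp
    · by_cases h0 : n = 0
      · have : rows = [] := List.eq_nil_of_length_eq_zero (h0 ▸ hlen)
        subst this; subst h0
        simp [pvALoop, pvChunk]
      · -- single partial page
        have hpc : (if n % 10 == 0 then n / 10 else n / 10 + 1) = 1 := by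
          have h1 : n % 10 = n := Nat.mod_eq_of_lt (by omega)
          simp [h1, h0, Nat.div_eq_of_lt (show n < 10 by omega)]
        rw [hpc, pvALoop]
        have hne : rows ≠ [] := by intro he; rw [he] at hlen; simp at hlen; omega
        have hstep : pvAStep columns rows pages = ([], pages ++ [rows ++
            List.replicate (10 - rows.length) (List.replicate columns.toNat "")]) := by
          unfold pvAStep
          have h1 : ¬ rows.length / 10 > 0 := by
            rw [hlen, Nat.div_eq_of_lt (by omega)]; omega
          have hd : (rows.length / 10 == 0 && rows.length % 10 != 0) = true := by
            rw [hlen, Nat.div_eq_of_lt (by omega), Nat.mod_eq_of_lt (by omega)]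
            simp; omega
          simp only [h1, if_false, hd, if_true]
          rw [pvFoldPush, pvFoldPad]
          simp
        rw [hstep, pvALoop]
        have hch : pvChunk columns rows = [rows ++
            List.replicate (10 - rows.length) (List.replicate columns.toNat "")] := by
          rw [pvChunk]
          simp [hne, show ¬ 10 ≤ rows.length by omega]
        rw [hch]

-- tens-chunking of a list whose length is a multiple of 10, as B's range-of-slices computes it
lemma pvRangeMap_eq_chunk (columns : Int) :
    ∀ q (l : List (List String)), l.length = 10 * q →
    (List.range q).map (fun k => (l.drop (10 * k)).take 10) = pvChunk columns l := by
  intro q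
  induction q with
  | zero =>
      intro l hl
      have : l = [] := List.eq_nil_of_length_eq_zero (by omega)
      subst this; simp [pvChunk]
  | succ k ih =>
      intro l hl
      have hne : l ≠ [] := by intro he; rw [he] at hl; simp at hl
      rw [List.range_succ_eq_map]
      rw [pvChunk]
      simp only [hne, if_false, show 10 ≤ l.length by omega, if_true]
      simp only [List.map_cons, Nat.mul_zero, List.drop_zero, List.map_map]
      congr 1
      rw [← ih (l.drop 10) (by simp [hl]; omega)]
      apply List.map_congr_left
      intro k' _
      simp only [Function.comp, List.drop_drop]
      congr 2
      omega

-- padding rows up to a multiple of 10 with blank rows does not change the chunking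
lemma pvChunk_pad (columns : Int) :
    ∀ n (rows : List (List String)), rows.length = n →
    pvChunk columns (rows ++ (List.range ((10 - n % 10) % 10)).map
        (fun _ => List.replicate columns.toNat "")) = pvChunk columns rows := by
  intro n
  induction n using Nat.strong_induction_on with
  | _ n ih =>
    intro rows hlen
    by_cases h10 : 10 ≤ n
    · have hne : rows ≠ [] := by intro he; rw [he] at hlen; simp at hlen; omega
      have hmod : (n - 10) % 10 = n % 10 := by omega
      have hA : pvChunk columns (rows ++ (List.range ((10 - n % 10) % 10)).map
          (fun _ => List.replicate columns.toNat ""))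
          = rows.take 10 :: pvChunk columns (rows.drop 10 ++ (List.range ((10 - n % 10) % 10)).map
            (fun _ => List.replicate columns.toNat "")) := by
        rw [pvChunk]
        have hne2 : rows ++ (List.range ((10 - n % 10) % 10)).map
            (fun _ => List.replicate columns.toNat "") ≠ [] := by simp [hne]
        have hlen10 : 10 ≤ (rows ++ (List.range ((10 - n % 10) % 10)).map
            (fun _ => List.replicate columns.toNat "")).length := by simp; omega
        have h10r : 10 ≤ rows.length := by omega
        simp only [hne2, if_false, hlen10, if_true,
          List.take_append_of_le_length h10r, List.drop_append_of_le_length h10r]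
      have hB : pvChunk columns rows = rows.take 10 :: pvChunk columns (rows.drop 10) := by
        rw [pvChunk]
        simp [hne, show 10 ≤ rows.length by omega]
      have hrec := ih (n - 10) (by omega) (rows.drop 10) (by simp; omega)
      rw [hmod] at hrec
      rw [hA, hB, hrec]
    · by_cases h0 : n = 0
      · have : rows = [] := List.eq_nil_of_length_eq_zero (h0 ▸ hlen)
        subst this; subst h0
        simp
      · have hne : rows ≠ [] := by intro he; rw [he] at hlen; simp at hlen; omega
        have hpadval : (10 - n % 10) % 10 = 10 - n := by omega
        rw [hpadval]
        have hlen2 : (rows ++ (List.range (10 - n)).map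
            (fun _ => List.replicate columns.toNat "")).length = 10 := by simp; omega
        have hne2 : rows ++ (List.range (10 - n)).map
            (fun _ => List.replicate columns.toNat "") ≠ [] := by simp [hne]
        have htake : (rows ++ (List.range (10 - n)).map
            (fun _ => List.replicate columns.toNat "")).take 10
            = rows ++ (List.range (10 - n)).map (fun _ => List.replicate columns.toNat "") :=
          List.take_of_length_le (by omega)
        have hdrop : (rows ++ (List.range (10 - n)).map
            (fun _ => List.replicate columns.toNat "")).drop 10 = [] :=
          List.drop_eq_nil_of_le (by omega)
        have hL : pvChunk columns (rows ++ (List.range (10 - n)).map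
            (fun _ => List.replicate columns.toNat ""))
            = [rows ++ (List.range (10 - n)).map (fun _ => List.replicate columns.toNat "")] := by
          rw [pvChunk]
          simp only [hne2, if_false, hlen2, le_refl, if_true, htake, hdrop]
          rw [pvChunk]; simp
        have hR : pvChunk columns rows = [rows ++
            List.replicate (10 - rows.length) (List.replicate columns.toNat "")] := by
          rw [pvChunk]
          simp [hne, show ¬ 10 ≤ rows.length by omega]
        rw [hL, hR]
        simp [List.map_const', hlen]

-- A's result equals the canonical chunking
lemma pvA_eq_chunk (rows : List (List String)) (columns : Int) :
    sort_into_rows_of_tens rows columns = pvChunk columns rows := by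
  show (pvALoop columns (if rows.length % 10 == 0 then rows.length / 10
      else rows.length / 10 + 1) rows []).2 = pvChunk columns rows
  rw [pvALoop_eq columns rows.length rows [] rfl]
  simp

-- B's result equals the canonical chunking
lemma pvB_eq_chunk (rows : List (List String)) (columns : Int) :
    sort_into_rows_of_tens_alt rows columns = pvChunk columns rows := by
  have hpad : (PySem.Int.mod (-(rows.length : Int)) 10).toNat
      = (10 - rows.length % 10) % 10 := by
    rw [PySem.Int.mod_eq_emod_of_pos (by omega)]
    omega
  show ((PySem.List.pyRange 0
      (((rows ++ (List.range ((PySem.Int.mod (-(rows.length : Int)) 10).toNat)).map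
        (fun _ => List.replicate columns.toNat "")).length : Nat) : Int) 10).map
      (fun i => PySem.List.slice (rows ++ (List.range
        ((PySem.Int.mod (-(rows.length : Int)) 10).toNat)).map
        (fun _ => List.replicate columns.toNat "")) (some i) (some (i + 10))))
      = pvChunk columns rows
  rw [hpad]
  set pad := (10 - rows.length % 10) % 10 with hpaddef
  set padded := rows ++ (List.range pad).map (fun _ => List.replicate columns.toNat "")
    with hpadded
  have hplen : padded.length = rows.length + pad := by simp [hpadded]
  have hdvd : (rows.length + pad) % 10 = 0 := by omega
  rw [PySem.List.pyRange_of_pos 0 (padded.length : Int) (by omega), List.map_map]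
  have hcount : (if (0 : Int) < (padded.length : Int)
      then (((padded.length : Int) - 0 + 10 - 1) / 10).toNat else 0)
      = (rows.length + pad) / 10 := by
    rw [hplen]
    by_cases hz : rows.length + pad = 0
    · simp [hz]
    · rw [if_pos (by exact_mod_cast Nat.pos_of_ne_zero hz)]
      omega
  rw [hcount]
  have hmap : ∀ k, ((fun i => PySem.List.slice padded (some i) (some (i + 10))) ∘
      fun k : Nat => (0 : Int) + 10 * (k : Int)) k = (padded.drop (10 * k)).take 10 := by
    intro k
    simp only [Function.comp]
    have h1 : (0 : Int) + 10 * (k : Int) = ((10 * k : Nat) : Int) := by push_cast; ring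
    rw [h1, show ((10 * k : Nat) : Int) + 10 = ((10 * k : Nat) : Int) + ((10 : Nat) : Int) by
      norm_num, PySem.List.slice_natCast_add]
  rw [List.map_congr_left (fun k _ => hmap k)]
  rw [pvRangeMap_eq_chunk columns ((rows.length + pad) / 10) padded (by omega)]
  exact pvChunk_pad columns rows.length rows rfl

-- ===== VERDICT (by name: the statement is the Claim_ definition above) =====
theorem sort_into_rows_of_tens_spec : Claim_equal_sort_into_rows_of_tens := by
  intro rows columns _
  unfold Spec_sort_into_rows_of_tens
  rw [pvA_eq_chunk, pvB_eq_chunk]
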